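-- pv_equiv track=rewrite | github.com/inexxt/knuth_bendix | knuth_bendix.py | less_than
-- ===== SOURCE A (Python) =====
-- def less_than(xs, ys):
--     if xs == ys:
--         return False
--
--     if len(xs) != len(ys):
--         return len(xs) < len(ys)
--
--     for x, y in zip(xs, ys):
--         if x != y:
--             return x < y
-- ===== SOURCE B (Python) =====
-- def less_than(xs, ys):
--     # Single fused parallel walk: remember the first element difference in an
--     # accumulator; when a side runs out first, length decides immediately.
--     acc = None
--     i = 0
--     while True:
--         more_x = i < len(xs)
--         more_y = i < len(ys)
--         if not more_x and not more_y:
--             return acc is True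
--         if not more_x:
--             return True
--         if not more_y:
--             return False
--         if acc is None and xs[i] != ys[i]:
--             acc = xs[i] < ys[i]
--         i += 1
-- ===== Notes on version B (the rewrite author's own statement) =====
-- stated objective: alternative
-- what changed: Replaces A's staged structure (equality guard, then a length comparison, then a zip scan) with a single fused parallel walk over both lists that carries a first-difference accumulator and decides by which side runs out first, never computing an upfront length or equality comparison.
import Mathlib
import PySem

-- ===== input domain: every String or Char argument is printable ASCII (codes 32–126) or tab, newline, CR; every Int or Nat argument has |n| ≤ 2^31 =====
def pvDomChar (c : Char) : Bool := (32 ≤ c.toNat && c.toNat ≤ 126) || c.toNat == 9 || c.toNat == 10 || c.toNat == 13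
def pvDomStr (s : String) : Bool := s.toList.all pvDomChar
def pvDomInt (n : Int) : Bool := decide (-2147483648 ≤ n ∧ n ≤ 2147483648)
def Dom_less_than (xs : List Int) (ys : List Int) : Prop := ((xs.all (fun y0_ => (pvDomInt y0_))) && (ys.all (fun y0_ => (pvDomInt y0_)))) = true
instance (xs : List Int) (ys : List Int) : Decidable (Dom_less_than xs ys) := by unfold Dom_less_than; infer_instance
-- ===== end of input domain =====

-- B replaces A's staged structure (equality guard, length branch, zip scan) with one
-- fused parallel walk carrying a first-difference accumulator; alternative, same cost.

-- ===== PORT A =====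
-- the zip loop: return x < y at the first differing pair; the implicit
-- 'return None' at loop exit is unreachable here (equal-length lists with
-- xs ≠ ys always contain a differing pair), ported as false
def lessThanLoopA : List (Int × Int) → Bool
  | [] => false
  | (x, y) :: rest => if x ≠ y then decide (x < y) else lessThanLoopA rest

def less_than (xs : List Int) (ys : List Int) : Bool :=
  if xs == ys then false
  else if xs.length ≠ ys.length then decide (xs.length < ys.length)
  else lessThanLoopA (xs.zip ys)

-- ===== PORT B =====
-- Source B's while loop advances an index over both lists; ported as the structural
-- recursion consuming both lists in step, with the same accumulator 'acc'
def lessThanWalkB : List Int → List Int → Option Bool → Bool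
  | [], [], acc => acc == some true          -- 'return acc is True'
  | [], _ :: _, _ => true                    -- xs exhausted first
  | _ :: _, [], _ => false                   -- ys exhausted first
  | x :: xs, y :: ys, acc =>
      lessThanWalkB xs ys (if acc == none && x ≠ y then some (decide (x < y)) else acc)

def less_than_alt (xs : List Int) (ys : List Int) : Bool :=
  lessThanWalkB xs ys none

-- ===== PRECONDITION & SPEC =====
def Spec_less_than (xs : List Int) (ys : List Int) (out : Bool) : Prop := out = less_than_alt xs ys
instance (xs : List Int) (ys : List Int) (out : Bool) : Decidable (Spec_less_than xs ys out) := by unfold Spec_less_than; infer_instance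

-- ===== CLAIM (what is proved, stated in full; the proofs are below) =====
def Claim_equal_less_than : Prop := ∀ (xs : List Int) (ys : List Int), Dom_less_than xs ys → Spec_less_than xs ys (less_than xs ys)

-- ===== LEMMAS AND PROOFS =====

-- the walk's result: lengths decide when they differ; otherwise the accumulator
-- (when already set) or A's zip-loop verdict
theorem walkB_spec : ∀ (xs ys : List Int) (acc : Option Bool),
    lessThanWalkB xs ys acc =
      if xs.length = ys.length then
        (match acc with
         | some b => b
         | none => lessThanLoopA (xs.zip ys))
      else decide (xs.length < ys.length) := by
  intro xs
  induction xs with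
  | nil =>
    intro ys acc
    cases ys with
    | nil => cases acc with
      | none => simp [lessThanWalkB, lessThanLoopA]
      | some b => cases b <;> simp [lessThanWalkB]
    | cons y ys => simp [lessThanWalkB]
  | cons x xs ih =>
    intro ys acc
    cases ys with
    | nil => simp [lessThanWalkB]
    | cons y ys =>
      simp only [lessThanWalkB, ih, List.length_cons, Nat.add_right_cancel_iff,
        List.zip_cons_cons, lessThanLoopA]
      by_cases hl : xs.length = ys.length
      · simp only [hl, if_true]
        by_cases hxy : x = y
        · subst hxy; cases acc <;> simp
        · cases acc <;> simp [hxy]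
      · simp only [hl, if_false]
        simp only [decide_eq_decide]
        omega

-- A's zip loop on two copies of the same list returns false
theorem loopA_self (xs : List Int) : lessThanLoopA (xs.zip xs) = false := by
  induction xs with
  | nil => rfl
  | cons x xs ih => simp [lessThanLoopA, ih]

-- ===== VERDICT (by name: the statement is the Claim_ definition above) =====
theorem less_than_spec : Claim_equal_less_than := by
  intro xs ys _
  unfold Spec_less_than less_than less_than_alt
  rw [walkB_spec]
  by_cases hl : xs.length = ys.length
  · simp only [hl, if_true]
    by_cases he : xs = ys
    · subst he; simp [loopA_self]
    · simp [he]
  · have hne : xs ≠ ys := fun h => hl (by rw [h])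
    simp [hne, hl]
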